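-- pv_equiv track=rewrite | github.com/ChahelPaatur/Self-Modifying-Program-Synthesis-via-Online-Library-Evolution | brain_arc_solver.py | op_outline_objects
-- ===== SOURCE A (Python) =====
-- from typing import List, Dict, Tuple, Optional, Callable
--
-- Grid = List[List[int]]
--
-- def find_connected_components(grid: Grid, bg: int = 0) -> List[Dict]:
-- 	if not grid: return []
-- 	h, w = len(grid), len(grid[0])
-- 	seen = [[False]*w for _ in range(h)]
-- 	objects = []
-- 	for r in range(h):
-- 		for c in range(w):
-- 			if grid[r][c] != bg and not seen[r][c]:
-- 				color = grid[r][c]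
-- 				cells = []
-- 				q = [(r,c)]; seen[r][c] = True
-- 				while q:
-- 					r0,c0 = q.pop(0)
-- 					cells.append((r0,c0))
-- 					for dr,dc in [(-1,0),(1,0),(0,-1),(0,1)]:
-- 						rn,cn = r0+dr, c0+dc
-- 						if 0<=rn<h and 0<=cn<w and not seen[rn][cn] and grid[rn][cn]==color:
-- 							seen[rn][cn]=True; q.append((rn,cn))
-- 				min_r = min(r for r,c in cells); max_r = max(r for r,c in cells)
-- 				min_c = min(c for r,c in cells); max_c = max(c for r,c in cells)
-- 				objects.append({
-- 					'cells': cells,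
-- 					'color': color,
-- 					'bbox': (min_r,min_c,max_r,max_c),
-- 					'center': ((min_r+max_r)/2, (min_c+max_c)/2),
-- 					'size': len(cells),
-- 				})
-- 	return objects
--
-- def op_outline_objects(g: Grid) -> Grid:
-- 	if not g: return g
-- 	h,w=len(g),len(g[0])
-- 	out=[[0]*w for _ in range(h)]
-- 	for o in find_connected_components(g):
-- 		color=o['color']
-- 		for r,c in o['cells']:
-- 			for dr,dc in [(-1,0),(1,0),(0,-1),(0,1)]:
-- 				rn,cn=r+dr,c+dc
-- 				if 0<=rn<h and 0<=cn<w and g[rn][cn]==0: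
-- 					out[r][c]=color
-- 	return out
-- ===== SOURCE B (Python) =====
-- def op_outline_objects(g):
-- 	if not g: return g
-- 	h, w = len(g), len(g[0])
-- 	return [[(g[r][c] if g[r][c] != 0 and any(
-- 			0 <= r+dr < h and 0 <= c+dc < w and g[r+dr][c+dc] == 0
-- 			for dr, dc in ((-1,0),(1,0),(0,-1),(0,1)))
-- 		else 0) for c in range(w)] for r in range(h)]
-- ===== Notes on version B (the rewrite author's own statement) =====
-- stated objective: simpler
-- what changed: Drops the BFS connected-component extraction entirely: since each component cell's color equals its own grid value, B outlines in one direct pass, setting out[r][c]=g[r][c] exactly when the cell is nonzero and has an in-bounds zero 4-neighbor.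
import Mathlib
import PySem

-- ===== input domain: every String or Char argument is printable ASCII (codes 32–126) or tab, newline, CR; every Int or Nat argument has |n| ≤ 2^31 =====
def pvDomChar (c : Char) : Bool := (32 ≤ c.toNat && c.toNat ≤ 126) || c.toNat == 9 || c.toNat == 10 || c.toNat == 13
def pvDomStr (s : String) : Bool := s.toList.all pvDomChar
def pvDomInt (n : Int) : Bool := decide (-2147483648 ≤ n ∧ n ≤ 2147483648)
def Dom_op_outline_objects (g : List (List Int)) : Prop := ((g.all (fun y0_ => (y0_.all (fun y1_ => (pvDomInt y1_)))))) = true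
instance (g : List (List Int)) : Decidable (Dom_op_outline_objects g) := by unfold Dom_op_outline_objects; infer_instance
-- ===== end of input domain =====

-- B replaces A's BFS connected-component extraction by a single direct pass (a cell is
-- outlined iff it is nonzero and has an in-bounds zero 4-neighbour); objective: simpler.

-- ===== PORT A =====
-- shared 2-D indexing helpers (Python's m[r][c] read and m[r][c] = v write)
def pvGetAt {α : Type} (d : α) (m : List (List α)) (p : Nat × Nat) : α :=
  (m.getD p.1 []).getD p.2 d

def pvSetAt {α : Type} (m : List (List α)) (p : Nat × Nat) (v : α) : List (List α) :=
  m.set p.1 ((m.getD p.1 []).set p.2 v)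

-- shape check used only as a totality guard for the BFS recursion (always true in use)
def pvShapeB {α : Type} (hh ww : Nat) (m : List (List α)) : Bool :=
  m.length == hh && m.all (fun row => row.length == ww)

def pvUnseen (s : List (List Bool)) : Nat := (s.map (fun row => row.count false)).sum

def pvInb (hh ww : Nat) (rn cn : Int) : Bool :=
  decide (0 ≤ rn) && decide (rn < (hh : Int)) && decide (0 ≤ cn) && decide (cn < (ww : Int))

def pvDirs : List (Int × Int) := [(-1, 0), (1, 0), (0, -1), (0, 1)]

-- body of A's "for dr,dc in [...]" neighbour loop inside the BFS while-loop
def pvNStep (g : List (List Int)) (hh ww : Nat) (color : Int) (p : Nat × Nat)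
    (st : List (List Bool) × List (Nat × Nat)) (d : Int × Int) :
    List (List Bool) × List (Nat × Nat) :=
  -- rn = r0+dr, cn = c0+dc inlined
  if pvInb hh ww ((p.1 : Int) + d.1) ((p.2 : Int) + d.2)
      && !(pvGetAt false st.1 (((p.1 : Int) + d.1).toNat, ((p.2 : Int) + d.2).toNat))
      && (pvGetAt 0 g (((p.1 : Int) + d.1).toNat, ((p.2 : Int) + d.2).toNat) == color) then
    (pvSetAt st.1 (((p.1 : Int) + d.1).toNat, ((p.2 : Int) + d.2).toNat) true,
      st.2 ++ [(((p.1 : Int) + d.1).toNat, ((p.2 : Int) + d.2).toNat)])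
  else st

-- lemmas cited by pvBFS's decreasing_by (termination of A's while-loop)
-- cited by pvBFS's decreasing_by (termination of A's while-loop); all auxiliary facts
-- are inlined as `have`s because only a lemma the port itself cites may precede the claim
theorem pvNFold_measure (g : List (List Int)) (hh ww : Nat) (color : Int) (p : Nat × Nat) :
    ∀ (ds : List (Int × Int)) (st : List (List Bool) × List (Nat × Nat)),
      pvShapeB hh ww st.1 = true →
      pvShapeB hh ww (ds.foldl (pvNStep g hh ww color p) st).1 = true ∧
      5 * pvUnseen (ds.foldl (pvNStep g hh ww color p) st).1 +
          (ds.foldl (pvNStep g hh ww color p) st).2.length ≤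
        5 * pvUnseen st.1 + st.2.length := by
  have shape_iff : ∀ (m : List (List Bool)), pvShapeB hh ww m = true ↔
      (m.length = hh ∧ ∀ row ∈ m, row.length = ww) := by
    intro m; simp [pvShapeB]
  have row_len : ∀ (m : List (List Bool)), pvShapeB hh ww m = true →
      ∀ i, i < hh → (m.getD i []).length = ww := by
    intro m hs i hi
    rw [shape_iff] at hs
    have hlt : i < m.length := by omega
    rw [List.getD_eq_getElem _ _ hlt]
    exact hs.2 _ (List.getElem_mem hlt)
  have shape_set : ∀ (m : List (List Bool)) (q : Nat × Nat) (v : Bool),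
      pvShapeB hh ww m = true → pvShapeB hh ww (pvSetAt m q v) = true := by
    intro m q v hs
    rw [shape_iff] at hs ⊢
    unfold pvSetAt
    by_cases hp : q.1 < m.length
    · refine ⟨by simpa using hs.1, ?_⟩
      intro row hrow
      rcases List.mem_or_eq_of_mem_set hrow with h | h
      · exact hs.2 _ h
      · subst h
        rw [List.length_set, List.getD_eq_getElem _ _ hp]
        exact hs.2 _ (List.getElem_mem hp)
    · rw [List.set_eq_of_length_le (Nat.le_of_not_lt hp)]
      exact hs
  have sum_set : ∀ (l : List Nat) (i a : Nat) (h : i < l.length),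
      (l.set i a).sum + l[i] = l.sum + a := by
    intro l
    induction l with
    | nil => intro i a h; simp at h
    | cons x xs ih =>
      intro i a h
      cases i with
      | zero => simp [List.set]; omega
      | succ n =>
        simp only [List.set, List.sum_cons]
        have := ih n a (by simpa using h)
        simp only [List.getElem_cons_succ]
        omega
  have count_set : ∀ (row : List Bool) (j : Nat), j < row.length →
      row.getD j false = false → (row.set j true).count false + 1 = row.count false := by
    intro row
    induction row with
    | nil => intro j hj; simp at hj
    | cons b bs ih =>
      intro j hj hf
      cases j with
      | zero =>
        simp at hf; subst hf
        simp [List.set]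
      | succ n =>
        have hih := ih n (by simpa using hj) (by simpa using hf)
        cases b <;> simp [List.set] <;> omega
  have unseen_set : ∀ (s : List (List Bool)) (q : Nat × Nat),
      pvShapeB hh ww s = true → q.1 < hh → q.2 < ww → pvGetAt false s q = false →
      pvUnseen (pvSetAt s q true) + 1 = pvUnseen s := by
    intro s q hs h1 h2 hf
    have hlen : q.1 < s.length := by rw [shape_iff] at hs; omega
    have hrow : (s.getD q.1 []).length = ww := row_len s hs q.1 h1
    have hrw : q.2 < (s.getD q.1 []).length := by omega
    unfold pvSetAt pvUnseen
    rw [List.map_set]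
    have hsum := sum_set (s.map (fun row => row.count false)) q.1
      (((s.getD q.1 []).set q.2 true).count false) (by simpa using hlen)
    have hget : (s.map (fun row => row.count false))[q.1]'(by simpa using hlen)
        = (s.getD q.1 []).count false := by
      rw [List.getElem_map, List.getD_eq_getElem _ _ hlen]
    have hcount := count_set (s.getD q.1 []) q.2 hrw hf
    rw [hget] at hsum
    omega
  have step : ∀ (st : List (List Bool) × List (Nat × Nat)) (d : Int × Int),
      pvShapeB hh ww st.1 = true →
      pvShapeB hh ww (pvNStep g hh ww color p st d).1 = true ∧
      5 * pvUnseen (pvNStep g hh ww color p st d).1 + (pvNStep g hh ww color p st d).2.length ≤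
        5 * pvUnseen st.1 + st.2.length := by
    intro st d hs
    unfold pvNStep
    split
    next hc =>
      simp only [Bool.and_eq_true, beq_iff_eq, Bool.not_eq_true'] at hc
      obtain ⟨⟨hinb, hseen⟩, hcol⟩ := hc
      simp only [pvInb, Bool.and_eq_true, decide_eq_true_eq] at hinb
      have hb1 : (((p.1 : Int) + d.1).toNat) < hh := by omega
      have hb2 : (((p.2 : Int) + d.2).toNat) < ww := by omega
      have hu := unseen_set st.1
        ((((p.1 : Int) + d.1).toNat, ((p.2 : Int) + d.2).toNat)) hs hb1 hb2 hseen
      refine ⟨shape_set _ _ _ hs, ?_⟩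
      simp only [List.length_append, List.length_cons, List.length_nil]
      omega
    next => exact ⟨hs, le_refl _⟩
  intro ds
  induction ds with
  | nil => intro st hs; exact ⟨hs, le_refl _⟩
  | cons d ds ih =>
    intro st hs
    have h1 := step st d hs
    have h2 := ih (pvNStep g hh ww color p st d) h1.1
    exact ⟨h2.1, le_trans h2.2 h1.2⟩

-- A's BFS while-loop: pop front, append to cells, push fresh same-color neighbours.
-- The shape test is only a totality guard (always true when called from pvFccStep).
def pvBFS (g : List (List Int)) (hh ww : Nat) (color : Int) (seen : List (List Bool))
    (q cells : List (Nat × Nat)) : List (List Bool) × List (Nat × Nat) :=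
  if hs : pvShapeB hh ww seen = true then
    match q with
    | [] => (seen, cells)
    | p :: qt =>
      let st := pvDirs.foldl (pvNStep g hh ww color p) (seen, qt)
      pvBFS g hh ww color st.1 st.2 (cells ++ [p])
  else (seen, cells)
termination_by 5 * pvUnseen seen + q.length
decreasing_by
  have := pvNFold_measure g hh ww color p pvDirs (seen, qt) hs
  simp only [List.length_cons] at *
  omega

structure PvObj where
  cells : List (Nat × Nat)
  color : Int
  bbox : Int × Int × Int × Int
  size : Int
  deriving DecidableEq, Repr

-- Python's min/max over a nonempty sequence (cells is never empty where these are used)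
def pvMinL (l : List Nat) : Nat := match l with | [] => 0 | x :: xs => xs.foldl Nat.min x
def pvMaxL (l : List Nat) : Nat := match l with | [] => 0 | x :: xs => xs.foldl Nat.max x

-- body of find_connected_components' nested r/c loop; the Python dict becomes PvObj.
-- Python also stores 'center', a float pair never read by op_outline_objects; floats are
-- not representable here, so that (unused) field is omitted.
def pvFccStep (g : List (List Int)) (hh ww : Nat)
    (st : List (List Bool) × List PvObj) (p : Nat × Nat) : List (List Bool) × List PvObj :=
  if (pvGetAt 0 g p != 0) && !(pvGetAt false st.1 p) then
    let color := pvGetAt 0 g p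
    let seen1 := pvSetAt st.1 p true
    let R := pvBFS g hh ww color seen1 [p] []
    let cells := R.2
    let minr := pvMinL (cells.map Prod.fst)
    let maxr := pvMaxL (cells.map Prod.fst)
    let minc := pvMinL (cells.map Prod.snd)
    let maxc := pvMaxL (cells.map Prod.snd)
    (R.1, st.2 ++ [⟨cells, color, ((minr : Int), (minc : Int), (maxr : Int), (maxc : Int)),
      (cells.length : Int)⟩])
  else st

-- "for r in range(h): for c in range(w)" as one flattened position list (same order)
def pvPositions (hh ww : Nat) : List (Nat × Nat) :=
  (List.range hh).flatMap fun r => (List.range ww).map fun c => (r, c)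

-- find_connected_components(g) (bg = 0)
def pvFcc (g : List (List Int)) : List PvObj :=
  match g with
  | [] => []
  | g0 :: _ =>
    ((pvPositions g.length g0.length).foldl (pvFccStep g g.length g0.length)
      (List.replicate g.length (List.replicate g0.length false), [])).2

-- body of op_outline_objects' "for dr,dc in [...]" loop
def pvPaintDir (g : List (List Int)) (hh ww : Nat) (color : Int) (p : Nat × Nat)
    (out : List (List Int)) (d : Int × Int) : List (List Int) :=
  -- rn = r+dr, cn = c+dc inlined
  if pvInb hh ww ((p.1 : Int) + d.1) ((p.2 : Int) + d.2)
      && (pvGetAt 0 g (((p.1 : Int) + d.1).toNat, ((p.2 : Int) + d.2).toNat) == 0) then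
    pvSetAt out p color
  else out

def op_outline_objects (g : List (List Int)) : List (List Int) :=
  match g with
  | [] => []
  | g0 :: _ =>
    let hh := g.length
    let ww := g0.length
    let out0 := List.replicate hh (List.replicate ww (0 : Int))
    (pvFcc g).foldl
      (fun out o => o.cells.foldl
        (fun out p => pvDirs.foldl (pvPaintDir g hh ww o.color p) out) out) out0

-- ===== PORT B =====
def pvHasZeroNbr (g : List (List Int)) (hh ww : Nat) (p : Nat × Nat) : Bool :=
  pvDirs.any fun d =>
    pvInb hh ww ((p.1 : Int) + d.1) ((p.2 : Int) + d.2) &&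
      (pvGetAt 0 g ((((p.1 : Int) + d.1).toNat, ((p.2 : Int) + d.2).toNat)) == 0)

def op_outline_objects_alt (g : List (List Int)) : List (List Int) :=
  match g with
  | [] => []
  | g0 :: _ =>
    (List.range g.length).map fun r => (List.range g0.length).map fun c =>
      let v := pvGetAt 0 g (r, c)
      if (v != 0) && pvHasZeroNbr g g.length g0.length (r, c) then v else 0

-- ===== PRECONDITION & SPEC =====
-- Pre_ excludes exactly the ragged grids on which Python A raises IndexError: some row
-- shorter than the first row (A indexes every row at all columns 0..len(g[0])-1).
def Pre_op_outline_objects (g : List (List Int)) : Prop :=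
  ∀ row ∈ g, (g.headD []).length ≤ row.length

instance (g : List (List Int)) : Decidable (Pre_op_outline_objects g) := by
  unfold Pre_op_outline_objects; infer_instance

def pvWitness_op_outline_objects : List (List Int) := [[1, 0], [0, 2]]

def Spec_op_outline_objects (g : List (List Int)) (out : List (List Int)) : Prop :=
  out = op_outline_objects_alt g

instance (g : List (List Int)) (out : List (List Int)) :
    Decidable (Spec_op_outline_objects g out) := by
  unfold Spec_op_outline_objects; infer_instance

-- ===== CLAIM (what is proved, stated in full; the proofs are below) =====
def Claim_equal_op_outline_objects : Prop :=
  ∀ (g : List (List Int)), Dom_op_outline_objects g → Pre_op_outline_objects g →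
    Spec_op_outline_objects g (op_outline_objects g)

-- ===== LEMMAS AND PROOFS =====

theorem pv_getD_set_ne {α : Type} (l : List α) (i j : Nat) (v d : α) (hne : j ≠ i) :
    (l.set i v).getD j d = l.getD j d := by
  by_cases hj : j < l.length
  · rw [List.getD_eq_getElem _ _ (by simpa using hj), List.getD_eq_getElem _ _ hj,
      List.getElem_set_ne (by omega)]
  · rw [List.getD_eq_default _ _ (by simpa using Nat.le_of_not_lt hj),
      List.getD_eq_default _ _ (Nat.le_of_not_lt hj)]

theorem pv_getD_set_self {α : Type} (l : List α) (i : Nat) (v d : α) (h : i < l.length) :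
    (l.set i v).getD i d = v := by
  rw [List.getD_eq_getElem _ _ (by simpa using h), List.getElem_set_self]

theorem pvShapeB_iff {α : Type} {hh ww : Nat} {m : List (List α)} :
    pvShapeB hh ww m = true ↔ (m.length = hh ∧ ∀ row ∈ m, row.length = ww) := by
  simp [pvShapeB]

theorem pv_shape_row_len {α : Type} {hh ww : Nat} {m : List (List α)}
    (hs : pvShapeB hh ww m = true) {i : Nat} (hi : i < hh) : (m.getD i []).length = ww := by
  rw [pvShapeB_iff] at hs
  have hlt : i < m.length := by omega
  rw [List.getD_eq_getElem _ _ hlt]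
  exact hs.2 _ (List.getElem_mem hlt)

theorem pvShapeB_setAt {α : Type} {hh ww : Nat} {m : List (List α)} (p : Nat × Nat) (v : α)
    (hs : pvShapeB hh ww m = true) : pvShapeB hh ww (pvSetAt m p v) = true := by
  rw [pvShapeB_iff] at hs ⊢
  unfold pvSetAt
  by_cases hp : p.1 < m.length
  · refine ⟨by simpa using hs.1, ?_⟩
    intro row hrow
    rcases List.mem_or_eq_of_mem_set hrow with h | h
    · exact hs.2 _ h
    · subst h
      rw [List.length_set, List.getD_eq_getElem _ _ hp]
      exact hs.2 _ (List.getElem_mem hp)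
  · rw [List.set_eq_of_length_le (Nat.le_of_not_lt hp)]
    exact hs


theorem pvGetAt_setAt_ne {α : Type} (d v : α) (m : List (List α)) (p q : Nat × Nat)
    (hne : q ≠ p) : pvGetAt d (pvSetAt m p v) q = pvGetAt d m q := by
  unfold pvGetAt pvSetAt
  by_cases h1 : q.1 = p.1
  · have h2 : q.2 ≠ p.2 := fun h => hne (Prod.ext h1 h)
    by_cases hp : p.1 < m.length
    · rw [h1, pv_getD_set_self _ _ _ _ hp, pv_getD_set_ne _ _ _ _ _ h2]
    · rw [List.set_eq_of_length_le (Nat.le_of_not_lt hp)]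
  · rw [pv_getD_set_ne _ _ _ _ _ h1]

theorem pvGetAt_setAt_self {α : Type} (d v : α) (m : List (List α)) (p : Nat × Nat)
    (h1 : p.1 < m.length) (h2 : p.2 < (m.getD p.1 []).length) :
    pvGetAt d (pvSetAt m p v) p = v := by
  unfold pvGetAt pvSetAt
  rw [pv_getD_set_self _ _ _ _ h1, pv_getD_set_self _ _ _ _ h2]

theorem pvGetAt_setAt_true_iff {hh ww : Nat} {s : List (List Bool)} {e : Nat × Nat}
    (hs : pvShapeB hh ww s = true) (hb1 : e.1 < hh) (hb2 : e.2 < ww) (x : Nat × Nat) :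
    pvGetAt false (pvSetAt s e true) x = true ↔ (x = e ∨ pvGetAt false s x = true) := by
  by_cases hx : x = e
  · subst hx
    have hl : x.1 < s.length := by rw [pvShapeB_iff] at hs; omega
    have hr : x.2 < (s.getD x.1 []).length := by rw [pv_shape_row_len hs hb1]; omega
    rw [pvGetAt_setAt_self _ _ _ _ hl hr]
    simp
  · rw [pvGetAt_setAt_ne _ _ _ _ _ hx]
    simp [hx]

theorem pv_getD_replicate {α : Type} (n i : Nat) (a d : α) :
    (List.replicate n a).getD i d = if i < n then a else d := by
  by_cases hi : i < n
  · rw [List.getD_eq_getElem _ _ (by simpa using hi), List.getElem_replicate, if_pos hi]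
  · rw [List.getD_eq_default _ _ (by simpa using Nat.le_of_not_lt hi), if_neg hi]

theorem pvGetAt_replicate_false (hh ww : Nat) (x : Nat × Nat) :
    pvGetAt false (List.replicate hh (List.replicate ww false)) x = false := by
  unfold pvGetAt
  rw [pv_getD_replicate]
  split
  · rw [pv_getD_replicate]; split <;> rfl
  · simp

theorem pvGetAt_replicate_zero (hh ww : Nat) (x : Nat × Nat) :
    pvGetAt 0 (List.replicate hh (List.replicate ww (0 : Int))) x = 0 := by
  unfold pvGetAt
  rw [pv_getD_replicate]
  split
  · rw [pv_getD_replicate]; split <;> rfl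
  · simp

theorem pvShapeB_replicate {α : Type} (hh ww : Nat) (a : α) :
    pvShapeB hh ww (List.replicate hh (List.replicate ww a)) = true := by
  rw [pvShapeB_iff]
  constructor
  · simp
  · intro row hrow
    rw [List.eq_of_mem_replicate hrow]
    simp

theorem pvNFold_char (g : List (List Int)) (hh ww : Nat) (color : Int) (p : Nat × Nat) :
    ∀ (ds : List (Int × Int)) (st : List (List Bool) × List (Nat × Nat)),
      pvShapeB hh ww st.1 = true →
      ∃ new : List (Nat × Nat),
        (ds.foldl (pvNStep g hh ww color p) st).2 = st.2 ++ new ∧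
        (∀ x ∈ new, x.1 < hh ∧ x.2 < ww ∧ pvGetAt 0 g x = color) ∧
        (∀ x, pvGetAt false (ds.foldl (pvNStep g hh ww color p) st).1 x = true ↔
          (pvGetAt false st.1 x = true ∨ x ∈ new)) := by
  intro ds
  induction ds with
  | nil => intro st hs; exact ⟨[], by simp, by simp, by simp⟩
  | cons d ds ih =>
    intro st hs
    have hstep : pvShapeB hh ww (pvNStep g hh ww color p st d).1 = true := by
      simpa using (pvNFold_measure g hh ww color p [d] st hs).1
    obtain ⟨new, hq, hcol, hiff⟩ := ih (pvNStep g hh ww color p st d) hstep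
    by_cases hc : (pvInb hh ww ((p.1 : Int) + d.1) ((p.2 : Int) + d.2)
        && !(pvGetAt false st.1 (((p.1 : Int) + d.1).toNat, ((p.2 : Int) + d.2).toNat))
        && (pvGetAt 0 g (((p.1 : Int) + d.1).toNat, ((p.2 : Int) + d.2).toNat) == color)) = true
    · have hst : pvNStep g hh ww color p st d =
          (pvSetAt st.1 ((((p.1 : Int) + d.1).toNat, ((p.2 : Int) + d.2).toNat)) true,
            st.2 ++ [((((p.1 : Int) + d.1).toNat, ((p.2 : Int) + d.2).toNat))]) := by
        unfold pvNStep; rw [if_pos hc]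
      simp only [Bool.and_eq_true, beq_iff_eq, Bool.not_eq_true'] at hc
      obtain ⟨⟨hinb, hseen⟩, hcole⟩ := hc
      simp only [pvInb, Bool.and_eq_true, decide_eq_true_eq] at hinb
      have hb1 : (((p.1 : Int) + d.1).toNat) < hh := by omega
      have hb2 : (((p.2 : Int) + d.2).toNat) < ww := by omega
      refine ⟨((((p.1 : Int) + d.1).toNat, ((p.2 : Int) + d.2).toNat)) :: new, ?_, ?_, ?_⟩
      · rw [List.foldl_cons, hq, hst]
        simp
      · intro x hx
        rcases List.mem_cons.mp hx with h | h
        · subst h; exact ⟨hb1, hb2, hcole⟩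
        · exact hcol x h
      · intro x
        rw [List.foldl_cons, hiff x, hst]
        have := pvGetAt_setAt_true_iff (s := st.1)
          (e := ((((p.1 : Int) + d.1).toNat, ((p.2 : Int) + d.2).toNat))) hs hb1 hb2 x
        simp only at this ⊢
        rw [this]
        simp [List.mem_cons]
        tauto
    · have hst : pvNStep g hh ww color p st d = st := by
        unfold pvNStep; rw [if_neg hc]
      rw [hst] at hq hiff
      exact ⟨new, by rw [List.foldl_cons, hst]; exact hq, hcol,
        by intro x; rw [List.foldl_cons, hst]; exact hiff x⟩

theorem pvBFS_spec (g : List (List Int)) (hh ww : Nat) (color : Int) :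
    ∀ (n : Nat) (seen : List (List Bool)) (q cells : List (Nat × Nat)),
      5 * pvUnseen seen + q.length = n →
      pvShapeB hh ww seen = true →
      (∀ x, (x ∈ q ∨ x ∈ cells) → pvGetAt false seen x = true) →
      (∀ x, (x ∈ q ∨ x ∈ cells) → x.1 < hh ∧ x.2 < ww ∧ pvGetAt 0 g x = color) →
      pvShapeB hh ww (pvBFS g hh ww color seen q cells).1 = true ∧
      (∀ x, (x ∈ q ∨ x ∈ cells) → x ∈ (pvBFS g hh ww color seen q cells).2) ∧
      (∀ x ∈ (pvBFS g hh ww color seen q cells).2,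
        x.1 < hh ∧ x.2 < ww ∧ pvGetAt 0 g x = color) ∧
      (∀ x, pvGetAt false (pvBFS g hh ww color seen q cells).1 x = true ↔
        (pvGetAt false seen x = true ∨ x ∈ (pvBFS g hh ww color seen q cells).2)) := by
  intro n
  induction n using Nat.strong_induction_on with
  | _ n ih =>
    intro seen q cells hn hs hseen hcolq
    cases q with
    | nil =>
      have hres : pvBFS g hh ww color seen [] cells = (seen, cells) := by
        rw [pvBFS, dif_pos hs]
      rw [hres]
      refine ⟨hs, ?_, ?_, ?_⟩
      · intro x hx; simpa using hx.resolve_left (by simp)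
      · intro x hx; exact hcolq x (Or.inr hx)
      · intro x
        constructor
        · exact Or.inl
        · rintro (h | h)
          · exact h
          · exact hseen x (Or.inr h)
    | cons p qt =>
      have hres : pvBFS g hh ww color seen (p :: qt) cells =
          pvBFS g hh ww color (pvDirs.foldl (pvNStep g hh ww color p) (seen, qt)).1
            (pvDirs.foldl (pvNStep g hh ww color p) (seen, qt)).2 (cells ++ [p]) := by
        rw [pvBFS, dif_pos hs]
      obtain ⟨hshape', hmeas⟩ := pvNFold_measure g hh ww color p pvDirs (seen, qt) hs
      obtain ⟨new, hq2, hnewcol, hiff⟩ := pvNFold_char g hh ww color p pvDirs (seen, qt) hs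
      simp only at hq2 hiff hmeas hshape'
      set F := pvDirs.foldl (pvNStep g hh ww color p) (seen, qt) with hF
      have hmono : ∀ x, pvGetAt false seen x = true → pvGetAt false F.1 x = true := by
        intro x hx; exact (hiff x).mpr (Or.inl hx)
      have hseen' : ∀ x, (x ∈ F.2 ∨ x ∈ cells ++ [p]) → pvGetAt false F.1 x = true := by
        intro x hx
        rcases hx with hx | hx
        · rw [hq2] at hx
          rcases List.mem_append.mp hx with hx | hx
          · exact hmono x (hseen x (Or.inl (List.mem_cons_of_mem _ hx)))
          · exact (hiff x).mpr (Or.inr hx)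
        · rcases List.mem_append.mp hx with hx | hx
          · exact hmono x (hseen x (Or.inr hx))
          · have : x = p := by simpa using hx
            subst this
            exact hmono x (hseen x (Or.inl (List.mem_cons_self)))
      have hcol' : ∀ x, (x ∈ F.2 ∨ x ∈ cells ++ [p]) →
          x.1 < hh ∧ x.2 < ww ∧ pvGetAt 0 g x = color := by
        intro x hx
        rcases hx with hx | hx
        · rw [hq2] at hx
          rcases List.mem_append.mp hx with hx | hx
          · exact hcolq x (Or.inl (List.mem_cons_of_mem _ hx))
          · exact hnewcol x hx
        · rcases List.mem_append.mp hx with hx | hx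
          · exact hcolq x (Or.inr hx)
          · have : x = p := by simpa using hx
            subst this
            exact hcolq x (Or.inl (List.mem_cons_self))
      have hlt : 5 * pvUnseen F.1 + F.2.length < n := by
        simp only [List.length_cons] at hn
        omega
      obtain ⟨ih1, ih2, ih3, ih4⟩ := ih _ hlt F.1 F.2 (cells ++ [p]) rfl hshape' hseen' hcol'
      rw [hres]
      refine ⟨ih1, ?_, ih3, ?_⟩
      · intro x hx
        rcases hx with hx | hx
        · rcases List.mem_cons.mp hx with hx | hx
          · subst hx
            exact ih2 x (Or.inr (List.mem_append.mpr (Or.inr (by simp))))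
          · refine ih2 x (Or.inl ?_)
            rw [hq2]
            exact List.mem_append.mpr (Or.inl hx)
        · exact ih2 x (Or.inr (List.mem_append.mpr (Or.inl hx)))
      · intro x
        rw [ih4 x, hiff x]
        constructor
        · rintro ((h | h) | h)
          · exact Or.inl h
          · refine Or.inr (ih2 x (Or.inl ?_))
            rw [hq2]
            exact List.mem_append.mpr (Or.inr h)
          · exact Or.inr h
        · rintro (h | h)
          · exact Or.inl (Or.inl h)
          · exact Or.inr h

-- invariant of find_connected_components' outer loop
def pvInv (g : List (List Int)) (hh ww : Nat) (st : List (List Bool) × List PvObj) : Prop :=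
  pvShapeB hh ww st.1 = true ∧
  (∀ o ∈ st.2, ∀ x ∈ o.cells, x.1 < hh ∧ x.2 < ww ∧ pvGetAt 0 g x = o.color ∧ o.color ≠ 0) ∧
  (∀ x, pvGetAt false st.1 x = true ↔ ∃ o ∈ st.2, x ∈ o.cells)

theorem pvFccStep_inv {g : List (List Int)} {hh ww : Nat} {st : List (List Bool) × List PvObj}
    {p : Nat × Nat} (hp1 : p.1 < hh) (hp2 : p.2 < ww) (hI : pvInv g hh ww st) :
    pvInv g hh ww (pvFccStep g hh ww st p) ∧
    (∀ x, pvGetAt false st.1 x = true → pvGetAt false (pvFccStep g hh ww st p).1 x = true) ∧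
    (pvGetAt 0 g p ≠ 0 → pvGetAt false (pvFccStep g hh ww st p).1 p = true) := by
  obtain ⟨hs, hobj, hchar⟩ := hI
  by_cases hc : ((pvGetAt 0 g p != 0) && !(pvGetAt false st.1 p)) = true
  · have hst : pvFccStep g hh ww st p =
        ((pvBFS g hh ww (pvGetAt 0 g p) (pvSetAt st.1 p true) [p] []).1,
          st.2 ++ [⟨(pvBFS g hh ww (pvGetAt 0 g p) (pvSetAt st.1 p true) [p] []).2,
            pvGetAt 0 g p,
            ((pvMinL (((pvBFS g hh ww (pvGetAt 0 g p) (pvSetAt st.1 p true) [p] []).2).map Prod.fst) : Int),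
             (pvMinL (((pvBFS g hh ww (pvGetAt 0 g p) (pvSetAt st.1 p true) [p] []).2).map Prod.snd) : Int),
             (pvMaxL (((pvBFS g hh ww (pvGetAt 0 g p) (pvSetAt st.1 p true) [p] []).2).map Prod.fst) : Int),
             (pvMaxL (((pvBFS g hh ww (pvGetAt 0 g p) (pvSetAt st.1 p true) [p] []).2).map Prod.snd) : Int)),
            (((pvBFS g hh ww (pvGetAt 0 g p) (pvSetAt st.1 p true) [p] []).2).length : Int)⟩]) := by
      unfold pvFccStep; rw [if_pos hc]
    simp only [Bool.and_eq_true, bne_iff_ne, Bool.not_eq_true'] at hc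
    obtain ⟨hgz, hunseen⟩ := hc
    have hs1 : pvShapeB hh ww (pvSetAt st.1 p true) = true := pvShapeB_setAt _ _ hs
    have hseen1 : ∀ x, (x ∈ [p] ∨ x ∈ ([] : List (Nat × Nat))) →
        pvGetAt false (pvSetAt st.1 p true) x = true := by
      intro x hx
      have hx' : x = p := by simpa using hx
      subst hx'
      exact (pvGetAt_setAt_true_iff hs hp1 hp2 x).mpr (Or.inl rfl)
    have hcol1 : ∀ x, (x ∈ [p] ∨ x ∈ ([] : List (Nat × Nat))) →
        x.1 < hh ∧ x.2 < ww ∧ pvGetAt 0 g x = pvGetAt 0 g p := by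
      intro x hx
      have hx' : x = p := by simpa using hx
      subst hx'
      exact ⟨hp1, hp2, rfl⟩
    obtain ⟨b1, b2, b3, b4⟩ := pvBFS_spec g hh ww (pvGetAt 0 g p) _
      (pvSetAt st.1 p true) [p] [] rfl hs1 hseen1 hcol1
    set R := pvBFS g hh ww (pvGetAt 0 g p) (pvSetAt st.1 p true) [p] [] with hR
    set O : PvObj := ⟨R.2, pvGetAt 0 g p, (((pvMinL (R.2.map Prod.fst)) : Int), ((pvMinL (R.2.map Prod.snd)) : Int), ((pvMaxL (R.2.map Prod.fst)) : Int), ((pvMaxL (R.2.map Prod.snd)) : Int)), ((R.2.length : Int))⟩ with hO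
    have hOc : O.cells = R.2 := rfl
    have hOcol : O.color = pvGetAt 0 g p := rfl
    have hpR : p ∈ R.2 := b2 p (Or.inl (by simp))
    refine ⟨⟨?_, ?_, ?_⟩, ?_, ?_⟩
    · rw [hst]; exact b1
    · rw [hst]
      intro o ho x hx
      rcases List.mem_append.mp ho with ho | ho
      · exact hobj o ho x hx
      · have ho' : o = O := by simpa using ho
        subst ho'
        rw [hOc] at hx
        obtain ⟨c1, c2, c3⟩ := b3 x hx
        rw [hOcol]
        exact ⟨c1, c2, c3, hgz⟩
    · rw [hst]
      intro x
      simp only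
      rw [b4 x, pvGetAt_setAt_true_iff hs hp1 hp2 x, hchar x]
      constructor
      · rintro ((h | h) | h)
        · subst h
          exact ⟨O, List.mem_append.mpr (Or.inr (by simp)), by rw [hOc]; exact hpR⟩
        · obtain ⟨o, ho, hxo⟩ := h
          exact ⟨o, List.mem_append.mpr (Or.inl ho), hxo⟩
        · exact ⟨O, List.mem_append.mpr (Or.inr (by simp)), by rw [hOc]; exact h⟩
      · rintro ⟨o, ho, hxo⟩
        rcases List.mem_append.mp ho with ho | ho
        · exact Or.inl (Or.inr ⟨o, ho, hxo⟩)
        · have ho' : o = O := by simpa using ho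
          subst ho'
          rw [hOc] at hxo
          exact Or.inr hxo
    · rw [hst]
      intro x hx
      exact (b4 x).mpr (Or.inl ((pvGetAt_setAt_true_iff hs hp1 hp2 x).mpr (Or.inr hx)))
    · rw [hst]
      intro _
      exact (b4 p).mpr (Or.inl ((pvGetAt_setAt_true_iff hs hp1 hp2 p).mpr (Or.inl rfl)))
  · have hst : pvFccStep g hh ww st p = st := by
      unfold pvFccStep; rw [if_neg hc]
    simp only [Bool.and_eq_true, bne_iff_ne, Bool.not_eq_true'] at hc
    refine ⟨by rw [hst]; exact ⟨hs, hobj, hchar⟩, by rw [hst]; intro x h; exact h, ?_⟩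
    rw [hst]
    intro hgz
    by_contra hnot
    exact hc ⟨hgz, by simpa using hnot⟩

theorem pvFccFold_inv (g : List (List Int)) (hh ww : Nat) :
    ∀ (ps : List (Nat × Nat)) (st : List (List Bool) × List PvObj),
      (∀ p ∈ ps, p.1 < hh ∧ p.2 < ww) → pvInv g hh ww st →
      pvInv g hh ww (ps.foldl (pvFccStep g hh ww) st) ∧
      (∀ x, pvGetAt false st.1 x = true →
        pvGetAt false (ps.foldl (pvFccStep g hh ww) st).1 x = true) ∧
      (∀ x ∈ ps, pvGetAt 0 g x ≠ 0 →
        pvGetAt false (ps.foldl (pvFccStep g hh ww) st).1 x = true) := by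
  intro ps
  induction ps with
  | nil => intro st _ hI; exact ⟨hI, fun x h => h, by simp⟩
  | cons p ps ih =>
    intro st hb hI
    have hp := hb p (List.mem_cons_self)
    obtain ⟨hI1, hmono1, hest⟩ := pvFccStep_inv hp.1 hp.2 hI
    obtain ⟨ihI, ihmono, ihcov⟩ := ih (pvFccStep g hh ww st p)
      (fun x hx => hb x (List.mem_cons_of_mem _ hx)) hI1
    refine ⟨by simpa using ihI, ?_, ?_⟩
    · intro x hx
      simpa using ihmono x (hmono1 x hx)
    · intro x hx hgz
      rcases List.mem_cons.mp hx with hx | hx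
      · subst hx
        simpa using ihmono x (hest hgz)
      · simpa using ihcov x hx hgz

theorem pv_mem_positions {hh ww : Nat} {x : Nat × Nat} :
    x ∈ pvPositions hh ww ↔ (x.1 < hh ∧ x.2 < ww) := by
  unfold pvPositions
  constructor
  · intro hx
    simp only [List.mem_flatMap, List.mem_map, List.mem_range] at hx
    obtain ⟨r, hr, c, hc, hx⟩ := hx
    subst hx
    exact ⟨hr, hc⟩
  · intro ⟨h1, h2⟩
    simp only [List.mem_flatMap, List.mem_map, List.mem_range]
    exact ⟨x.1, h1, x.2, h2, rfl⟩

theorem pvFcc_char (g0 : List Int) (gr : List (List Int)) :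
    (∀ o ∈ pvFcc (g0 :: gr), ∀ x ∈ o.cells,
      x.1 < (g0 :: gr).length ∧ x.2 < g0.length ∧
      pvGetAt 0 (g0 :: gr) x = o.color ∧ o.color ≠ 0) ∧
    (∀ x : Nat × Nat, x.1 < (g0 :: gr).length → x.2 < g0.length →
      pvGetAt 0 (g0 :: gr) x ≠ 0 → ∃ o ∈ pvFcc (g0 :: gr), x ∈ o.cells) := by
  have hI0 : pvInv (g0 :: gr) (g0 :: gr).length g0.length
      (List.replicate (g0 :: gr).length (List.replicate g0.length false), []) := by
    refine ⟨pvShapeB_replicate _ _ _, by simp, ?_⟩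
    intro x
    rw [pvGetAt_replicate_false]
    simp
  obtain ⟨hI, _, hcov⟩ := pvFccFold_inv (g0 :: gr) (g0 :: gr).length g0.length
    (pvPositions (g0 :: gr).length g0.length) _
    (fun p hp => pv_mem_positions.mp hp) hI0
  have hfcc : pvFcc (g0 :: gr) =
      ((pvPositions (g0 :: gr).length g0.length).foldl
        (pvFccStep (g0 :: gr) (g0 :: gr).length g0.length)
        (List.replicate (g0 :: gr).length (List.replicate g0.length false), [])).2 := rfl
  constructor
  · rw [hfcc]
    exact hI.2.1
  · intro x h1 h2 hgz
    rw [hfcc]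
    exact (hI.2.2 x).mp (hcov x (pv_mem_positions.mpr ⟨h1, h2⟩) hgz)

theorem pvPaintDirs_char (g : List (List Int)) (hh ww : Nat) (color : Int) (p : Nat × Nat) :
    ∀ (ds : List (Int × Int)) (out : List (List Int)),
      pvShapeB hh ww out = true → p.1 < hh → p.2 < ww →
      pvShapeB hh ww (ds.foldl (pvPaintDir g hh ww color p) out) = true ∧
      ∀ x, pvGetAt 0 (ds.foldl (pvPaintDir g hh ww color p) out) x =
        if x = p ∧ (∃ d ∈ ds, (pvInb hh ww ((p.1 : Int) + d.1) ((p.2 : Int) + d.2)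
            && (pvGetAt 0 g ((((p.1 : Int) + d.1).toNat, ((p.2 : Int) + d.2).toNat)) == 0))
            = true) then color else pvGetAt 0 out x := by
  intro ds
  induction ds with
  | nil =>
    intro out hs _ _
    refine ⟨hs, ?_⟩
    intro x
    simp
  | cons d ds ih =>
    intro out hs hp1 hp2
    by_cases hc : (pvInb hh ww ((p.1 : Int) + d.1) ((p.2 : Int) + d.2)
        && (pvGetAt 0 g ((((p.1 : Int) + d.1).toNat, ((p.2 : Int) + d.2).toNat)) == 0)) = true
    · have hst : pvPaintDir g hh ww color p out d = pvSetAt out p color := by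
        unfold pvPaintDir; rw [if_pos hc]
      have hs1 : pvShapeB hh ww (pvSetAt out p color) = true := pvShapeB_setAt _ _ hs
      obtain ⟨ih1, ih2⟩ := ih (pvSetAt out p color) hs1 hp1 hp2
      rw [List.foldl_cons, hst]
      refine ⟨ih1, ?_⟩
      intro x
      rw [ih2 x]
      by_cases hx : x = p
      · subst hx
        have hself : pvGetAt 0 (pvSetAt out x color) x = color := by
          apply pvGetAt_setAt_self
          · rw [pvShapeB_iff] at hs; omega
          · rw [pv_shape_row_len hs hp1]; omega
        rw [if_pos (show x = x ∧ ∃ d' ∈ d :: ds,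
          (pvInb hh ww ((x.1 : Int) + d'.1) ((x.2 : Int) + d'.2)
            && (pvGetAt 0 g ((((x.1 : Int) + d'.1).toNat, ((x.2 : Int) + d'.2).toNat)) == 0))
            = true from ⟨rfl, d, List.mem_cons_self, hc⟩)]
        split
        · rfl
        · exact hself
      · rw [pvGetAt_setAt_ne _ _ _ _ _ hx]
        simp only [hx, false_and, if_false]
    · have hst : pvPaintDir g hh ww color p out d = out := by
        unfold pvPaintDir; rw [if_neg hc]
      obtain ⟨ih1, ih2⟩ := ih out hs hp1 hp2
      rw [List.foldl_cons, hst]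
      refine ⟨ih1, ?_⟩
      intro x
      rw [ih2 x]
      congr 1
      · simp only [eq_iff_iff, and_congr_right_iff]
        intro _
        constructor
        · rintro ⟨d', hd', h⟩
          exact ⟨d', List.mem_cons_of_mem _ hd', h⟩
        · rintro ⟨d', hd', h⟩
          rcases List.mem_cons.mp hd' with h' | h'
          · subst h'; exact absurd h hc
          · exact ⟨d', h', h⟩

theorem pv_exists_dirs_iff_hzn (g : List (List Int)) (hh ww : Nat) (x : Nat × Nat) :
    (∃ d ∈ pvDirs, (pvInb hh ww ((x.1 : Int) + d.1) ((x.2 : Int) + d.2)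
        && (pvGetAt 0 g ((((x.1 : Int) + d.1).toNat, ((x.2 : Int) + d.2).toNat)) == 0))
        = true) ↔ pvHasZeroNbr g hh ww x = true := by
  unfold pvHasZeroNbr
  rw [List.any_eq_true]

theorem pvPaintCells_char (g : List (List Int)) (hh ww : Nat) (color : Int) :
    ∀ (cells : List (Nat × Nat)) (out : List (List Int)),
      pvShapeB hh ww out = true →
      (∀ q ∈ cells, q.1 < hh ∧ q.2 < ww ∧ pvGetAt 0 g q = color) →
      pvShapeB hh ww (cells.foldl
        (fun out q => pvDirs.foldl (pvPaintDir g hh ww color q) out) out) = true ∧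
      ∀ x, pvGetAt 0 (cells.foldl
          (fun out q => pvDirs.foldl (pvPaintDir g hh ww color q) out) out) x =
        if x ∈ cells ∧ pvHasZeroNbr g hh ww x = true then pvGetAt 0 g x
        else pvGetAt 0 out x := by
  intro cells
  induction cells with
  | nil =>
    intro out hs _
    exact ⟨hs, by intro x; simp⟩
  | cons q cells ih =>
    intro out hs hcol
    have hq := hcol q (List.mem_cons_self)
    obtain ⟨d1, d2⟩ := pvPaintDirs_char g hh ww color q pvDirs out hs hq.1 hq.2.1
    obtain ⟨ih1, ih2⟩ := ih (pvDirs.foldl (pvPaintDir g hh ww color q) out) d1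
      (fun x hx => hcol x (List.mem_cons_of_mem _ hx))
    rw [List.foldl_cons]
    refine ⟨ih1, ?_⟩
    intro x
    rw [ih2 x, d2 x]
    by_cases hin : x ∈ cells ∧ pvHasZeroNbr g hh ww x = true
    · rw [if_pos hin, if_pos ⟨List.mem_cons_of_mem _ hin.1, hin.2⟩]
    · rw [if_neg hin]
      by_cases hxq : x = q ∧ pvHasZeroNbr g hh ww x = true
      · obtain ⟨hxq', hz⟩ := hxq
        subst hxq'
        rw [if_pos ⟨rfl, (pv_exists_dirs_iff_hzn g hh ww _).mpr hz⟩,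
          if_pos ⟨List.mem_cons_self, hz⟩]
        exact hq.2.2.symm
      · rw [if_neg (fun h => hxq ⟨h.1, by
            rw [h.1]; exact (pv_exists_dirs_iff_hzn g hh ww q).mp h.2⟩),
          if_neg (fun h => (List.mem_cons.mp h.1).elim
            (fun e => hxq ⟨e, h.2⟩) (fun m => hin ⟨m, h.2⟩))]

theorem pvPaintObjs_char (g : List (List Int)) (hh ww : Nat) :
    ∀ (objs : List PvObj) (out : List (List Int)),
      pvShapeB hh ww out = true →
      (∀ o ∈ objs, ∀ q ∈ o.cells, q.1 < hh ∧ q.2 < ww ∧ pvGetAt 0 g q = o.color) →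
      pvShapeB hh ww (objs.foldl (fun out o => o.cells.foldl
        (fun out p => pvDirs.foldl (pvPaintDir g hh ww o.color p) out) out) out) = true ∧
      ∀ x, pvGetAt 0 (objs.foldl (fun out o => o.cells.foldl
          (fun out p => pvDirs.foldl (pvPaintDir g hh ww o.color p) out) out) out) x =
        if (∃ o ∈ objs, x ∈ o.cells) ∧ pvHasZeroNbr g hh ww x = true then pvGetAt 0 g x
        else pvGetAt 0 out x := by
  intro objs
  induction objs with
  | nil =>
    intro out hs _
    exact ⟨hs, by intro x; simp⟩
  | cons o objs ih =>
    intro out hs hcol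
    obtain ⟨c1, c2⟩ := pvPaintCells_char g hh ww o.color o.cells out hs
      (hcol o (List.mem_cons_self))
    obtain ⟨ih1, ih2⟩ := ih _ c1 (fun o' ho' => hcol o' (List.mem_cons_of_mem _ ho'))
    rw [List.foldl_cons]
    refine ⟨ih1, ?_⟩
    intro x
    rw [ih2 x, c2 x]
    by_cases hin : (∃ o' ∈ objs, x ∈ o'.cells) ∧ pvHasZeroNbr g hh ww x = true
    · rw [if_pos hin, if_pos ⟨⟨hin.1.choose, List.mem_cons_of_mem _ hin.1.choose_spec.1,
        hin.1.choose_spec.2⟩, hin.2⟩]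
    · rw [if_neg hin]
      by_cases hxo : x ∈ o.cells ∧ pvHasZeroNbr g hh ww x = true
      · rw [if_pos hxo, if_pos ⟨⟨o, List.mem_cons_self, hxo.1⟩, hxo.2⟩]
      · rw [if_neg hxo, if_neg]
        rintro ⟨⟨o', ho', hxo'⟩, hz⟩
        rcases List.mem_cons.mp ho' with h | h
        · subst h; exact hxo ⟨hxo', hz⟩
        · exact hin ⟨⟨o', h, hxo'⟩, hz⟩

theorem pvGetAt_eq_getElem (m : List (List Int)) (i j : Nat) (hi : i < m.length)
    (hj : j < (m[i]'hi).length) : pvGetAt 0 m (i, j) = (m[i]'hi)[j]'hj := by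
  unfold pvGetAt
  simp only
  rw [List.getD_eq_getElem _ _ hi, List.getD_eq_getElem _ _ hj]

-- ===== VERDICT (by name: the statement is the Claim_ definition above) =====
theorem op_outline_objects_spec : Claim_equal_op_outline_objects := by
  intro g _ _
  unfold Spec_op_outline_objects
  cases g with
  | nil => rfl
  | cons g0 gr =>
    obtain ⟨hcells, hcov⟩ := pvFcc_char g0 gr
    obtain ⟨hshape, hval⟩ := pvPaintObjs_char (g0 :: gr) (g0 :: gr).length g0.length
      (pvFcc (g0 :: gr)) (List.replicate (g0 :: gr).length (List.replicate g0.length 0))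
      (pvShapeB_replicate _ _ _)
      (fun o ho q hq =>
        ⟨(hcells o ho q hq).1, (hcells o ho q hq).2.1, (hcells o ho q hq).2.2.1⟩)
    set FA := (pvFcc (g0 :: gr)).foldl (fun out o => o.cells.foldl
        (fun out p => pvDirs.foldl
          (pvPaintDir (g0 :: gr) (g0 :: gr).length g0.length o.color p) out) out)
        (List.replicate (g0 :: gr).length (List.replicate g0.length 0)) with hFA
    have hA : op_outline_objects (g0 :: gr) = FA := rfl
    have hB : op_outline_objects_alt (g0 :: gr) =
        (List.range (g0 :: gr).length).map (fun r => (List.range g0.length).map fun c =>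
          if ((pvGetAt 0 (g0 :: gr) (r, c)) != 0)
              && pvHasZeroNbr (g0 :: gr) (g0 :: gr).length g0.length (r, c)
          then pvGetAt 0 (g0 :: gr) (r, c) else 0) := rfl
    rw [hA, hB]
    rw [pvShapeB_iff] at hshape
    apply List.ext_getElem
    · simp [hshape.1]
    · intro i hi1 hi2
      have hiH : i < (g0 :: gr).length := by omega
      have hrowlen : (FA[i]'hi1).length = g0.length :=
        hshape.2 _ (List.getElem_mem hi1)
      apply List.ext_getElem
      · simp [hrowlen]
      · intro j hj1 hj2
        have hjW : j < g0.length := by rw [hrowlen] at hj1; exact hj1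
        have hBij : (((List.range (g0 :: gr).length).map
            (fun r => (List.range g0.length).map fun c =>
              if ((pvGetAt 0 (g0 :: gr) (r, c)) != 0)
                  && pvHasZeroNbr (g0 :: gr) (g0 :: gr).length g0.length (r, c)
              then pvGetAt 0 (g0 :: gr) (r, c) else 0))[i]'hi2)[j]'hj2 =
            (if ((pvGetAt 0 (g0 :: gr) (i, j)) != 0)
                && pvHasZeroNbr (g0 :: gr) (g0 :: gr).length g0.length (i, j)
            then pvGetAt 0 (g0 :: gr) (i, j) else 0) := by
          simp
        rw [hBij]
        rw [← pvGetAt_eq_getElem FA i j hi1 hj1]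
        rw [hval (i, j), pvGetAt_replicate_zero]
        by_cases hz : pvGetAt 0 (g0 :: gr) (i, j) = 0
        · rw [if_neg, hz]
          · simp
          · rintro ⟨⟨o, ho, hio⟩, -⟩
            exact (hcells o ho (i, j) hio).2.2.2 (by
              rw [← (hcells o ho (i, j) hio).2.2.1]; exact hz)
        · by_cases hn : pvHasZeroNbr (g0 :: gr) (g0 :: gr).length g0.length (i, j) = true
          · rw [if_pos ⟨hcov (i, j) hiH hjW hz, hn⟩,
              if_pos (show (pvGetAt 0 (g0 :: gr) (i, j) != 0
                && pvHasZeroNbr (g0 :: gr) (g0 :: gr).length g0.length (i, j)) = true by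
                  rw [Bool.and_eq_true]
                  exact ⟨by simpa using hz, hn⟩)]
          · rw [if_neg (fun h => hn h.2),
              if_neg (show ¬ (pvGetAt 0 (g0 :: gr) (i, j) != 0
                && pvHasZeroNbr (g0 :: gr) (g0 :: gr).length g0.length (i, j)) = true by
                  rw [Bool.and_eq_true]
                  exact fun h => hn h.2)]
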